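-- pv_equiv track=rewrite | github.com/Mallfurion/roughcut-stdio | services/analyzer/app/ai.py | close_partial_json
-- ===== SOURCE A (Python) =====
-- def close_partial_json(raw: str) -> str:
--     output: list[str] = []
--     closers: list[str] = []
--     in_string = False
--     escaped = False
--
--     for char in raw:
--         output.append(char)
--         if in_string:
--             if escaped:
--                 escaped = False
--             elif char == "\\":
--                 escaped = True
--             elif char == '"':
--                 in_string = False
--             continue
--
--         if char == '"':
--             in_string = True
--         elif char == "{":
--             closers.append("}")
--         elif char == "[":
--             closers.append("]")
--         elif char in {"]", "}"} and closers and closers[-1] == char: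
--             closers.pop()
--
--     if in_string:
--         output.append('"')
--
--     while closers:
--         output.append(closers.pop())
--
--     return "".join(output)
-- ===== SOURCE B (Python) =====
-- def close_partial_json(raw: str) -> str:
--     closers = []
--     open_string = False
--     i = 0
--     n = len(raw)
--     while i < n:
--         c = raw[i]
--         if c == '{':
--             closers.append('}')
--         elif c == '[':
--             closers.append(']')
--         elif c in (']', '}'):
--             if closers and closers[-1] == c:
--                 closers.pop()
--         elif c == '"':
--             i += 1
--             open_string = True
--             while i < n:
--                 if raw[i] == '\\':
--                     i += 2
--                 elif raw[i] == '"':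
--                     i += 1
--                     open_string = False
--                     break
--                 else:
--                     i += 1
--             if open_string:
--                 break
--             continue
--         i += 1
--     return raw + ('"' if open_string else '') + ''.join(reversed(closers))
-- ===== Notes on version B (the rewrite author's own statement) =====
-- stated objective: alternative
-- what changed: A's single flat loop with in_string/escaped flags and a per-char output list is replaced by an index scan with a nested string-consuming inner loop, returning raw itself plus the closing quote and the reversed remaining closers.
import Mathlib
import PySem

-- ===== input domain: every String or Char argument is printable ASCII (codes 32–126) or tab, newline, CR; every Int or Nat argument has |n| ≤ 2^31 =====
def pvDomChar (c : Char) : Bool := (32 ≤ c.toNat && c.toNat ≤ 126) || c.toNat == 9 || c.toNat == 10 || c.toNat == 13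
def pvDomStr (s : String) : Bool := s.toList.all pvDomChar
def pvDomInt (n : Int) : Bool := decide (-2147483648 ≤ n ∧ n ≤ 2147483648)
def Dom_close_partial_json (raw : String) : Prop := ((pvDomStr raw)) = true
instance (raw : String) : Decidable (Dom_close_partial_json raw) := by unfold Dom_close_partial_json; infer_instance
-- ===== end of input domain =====

-- B replaces A's flat flag-driven character loop by an index scan with a nested
-- string-consuming loop and emits raw itself as the prefix (objective: simpler
-- decomposition, same cost).

-- ===== PORT A =====
-- state: (output, closers, in_string, escaped); closers stored top-first
-- (the head of the Lean list models the END of the Python list)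
def stepA (s : List Char × List Char × Bool × Bool) (char : Char) :
    List Char × List Char × Bool × Bool :=
  match s with
  | (output, closers, in_string, escaped) =>
    let output := output ++ [char]
    if in_string then
      if escaped then (output, closers, in_string, false)
      else if char = '\\' then (output, closers, in_string, true)
      else if char = '"' then (output, closers, false, escaped)
      else (output, closers, in_string, escaped)
    else
      if char = '"' then (output, closers, true, escaped)
      else if char = '{' then (output, '}' :: closers, in_string, escaped)
      else if char = '[' then (output, ']' :: closers, in_string, escaped)
      else if (char = ']' ∨ char = '}') ∧ closers ≠ [] ∧ closers.headD ' ' = char then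
        (output, closers.tail, in_string, escaped)
      else (output, closers, in_string, escaped)

def close_partial_json (raw : String) : String :=
  let st := raw.toList.foldl stepA ([], [], false, false)
  let output := if st.2.2.1 then st.1 ++ ['"'] else st.1
  -- the final while loop pops closers (top first) onto output = append the stack as stored
  String.ofList (output ++ st.2.1)

-- ===== PORT B =====
-- inner while loop of B: consume a string body; some rest = closed (rest after
-- the closing quote), none = input ended with the string still open
def scanString : List Char → Option (List Char)
  | [] => none
  | c :: rest =>
    if c = '\\' then
      match rest with
      | [] => none
      | _ :: rs => scanString rs
    else if c = '"' then some rest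
    else scanString rest

-- needed by closeB's termination argument (cited in decreasing_by)
theorem scanString_length : ∀ (l r : List Char), scanString l = some r → r.length < l.length := by
  intro l
  induction l using scanString.induct with
  | case1 => intro r h; simp [scanString] at h
  | case2 => intro r h; simp [scanString] at h
  | case3 head rs ih =>
      intro r h
      rw [scanString] at h
      simp at h
      have := ih r h
      simp only [List.length_cons]; omega
  | case4 rs h0 =>
      intro r h
      simp [scanString.eq_def] at h
      subst h
      simp only [List.length_cons]; omega
  | case5 head rs hbs hq ih =>
      intro r h
      rw [scanString.eq_def] at h
      simp [hbs, hq] at h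
      have := ih r h
      simp only [List.length_cons]; omega

-- outer loop of B: returns (remaining closers stack, string-left-open flag)
def closeB : List Char → List Char → List Char × Bool
  | [], stack => (stack, false)
  | c :: rest, stack =>
    if c = '{' then closeB rest ('}' :: stack)
    else if c = '[' then closeB rest (']' :: stack)
    else if c = ']' ∨ c = '}' then
      if stack ≠ [] ∧ stack.headD ' ' = c then closeB rest stack.tail
      else closeB rest stack
    else if c = '"' then
      match h : scanString rest with
      | some rest' => closeB rest' stack
      | none => (stack, true)
    else closeB rest stack
termination_by l _ => l.length
decreasing_by
  · simp
  · simp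
  · simp
  · simp
  · have := scanString_length rest rest' h; simp; omega
  · simp

def close_partial_json_alt (raw : String) : String :=
  let st := closeB raw.toList []
  String.ofList (raw.toList ++ (if st.2 then ['"'] else []) ++ st.1)

-- ===== PRECONDITION & SPEC =====
def Spec_close_partial_json (raw : String) (out : String) : Prop := out = close_partial_json_alt raw
instance (raw : String) (out : String) : Decidable (Spec_close_partial_json raw out) := by unfold Spec_close_partial_json; infer_instance

-- ===== CLAIM (what is proved, stated in full; the proofs are below) =====
def Claim_equal_close_partial_json : Prop := ∀ (raw : String), Dom_close_partial_json raw → Spec_close_partial_json raw (close_partial_json raw)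

-- ===== LEMMAS AND PROOFS =====

-- A's state with the output component dropped
def gA (r : List Char × Bool × Bool) (c : Char) : List Char × Bool × Bool :=
  (stepA ([], r) c).2

-- evaluation lemmas for gA, one per branch of A's loop body
theorem gA_esc (cl : List Char) (c : Char) : gA (cl, true, true) c = (cl, true, false) := by
  simp [gA, stepA]

theorem gA_str_bs (cl : List Char) : gA (cl, true, false) '\\' = (cl, true, true) := by
  simp [gA, stepA]

theorem gA_str_quote (cl : List Char) : gA (cl, true, false) '"' = (cl, false, false) := by
  simp [gA, stepA]

theorem gA_str_other (cl : List Char) (c : Char) (hbs : ¬c = '\\') (hq : ¬c = '"') :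
    gA (cl, true, false) c = (cl, true, false) := by
  simp [gA, stepA, hbs, hq]

theorem gA_brace (cl : List Char) : gA (cl, false, false) '{' = ('}' :: cl, false, false) := by
  simp [gA, stepA]

theorem gA_brack (cl : List Char) : gA (cl, false, false) '[' = (']' :: cl, false, false) := by
  simp [gA, stepA]

theorem gA_quote (cl : List Char) : gA (cl, false, false) '"' = (cl, true, false) := by
  simp [gA, stepA]

theorem gA_pop (cl : List Char) (c : Char) (hclose : c = ']' ∨ c = '}')
    (hp : cl ≠ [] ∧ cl.headD ' ' = c) : gA (cl, false, false) c = (cl.tail, false, false) := by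
  have hh : cl.head?.getD ' ' = c := by simpa using hp.2
  rcases hclose with h | h <;> subst h <;> simp [gA, stepA, hp.1, hh]

theorem gA_nopop (cl : List Char) (c : Char) (hclose : c = ']' ∨ c = '}')
    (hp : ¬(cl ≠ [] ∧ cl.headD ' ' = c)) : gA (cl, false, false) c = (cl, false, false) := by
  have hp' : ¬(¬cl = [] ∧ cl.head?.getD ' ' = c) := by simpa using hp
  rcases hclose with h | h <;> subst h <;> simp [gA, stepA, hp']

theorem gA_plain (cl : List Char) (c : Char) (h1 : ¬c = '{') (h2 : ¬c = '[')
    (h3 : ¬(c = ']' ∨ c = '}')) (hq : ¬c = '"') :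
    gA (cl, false, false) c = (cl, false, false) := by
  simp [gA, stepA, h1, h2, h3, hq]

theorem stepA_fst (s : List Char × List Char × Bool × Bool) (c : Char) :
    (stepA s c).1 = s.1 ++ [c] := by
  obtain ⟨o, cl, i, e⟩ := s
  simp only [stepA]
  split_ifs <;> rfl

theorem stepA_snd (s : List Char × List Char × Bool × Bool) (c : Char) :
    (stepA s c).2 = gA s.2 c := by
  obtain ⟨o, cl, i, e⟩ := s
  simp only [stepA, gA]
  split_ifs <;> rfl

theorem foldl_stepA_fst : ∀ (l : List Char) (s : List Char × List Char × Bool × Bool),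
    (l.foldl stepA s).1 = s.1 ++ l := by
  intro l
  induction l with
  | nil => intro s; simp
  | cons c t ih =>
      intro s
      simp only [List.foldl_cons, ih, stepA_fst, List.append_assoc, List.cons_append,
        List.nil_append]

theorem foldl_stepA_snd : ∀ (l : List Char) (s : List Char × List Char × Bool × Bool),
    (l.foldl stepA s).2 = l.foldl gA s.2 := by
  intro l
  induction l with
  | nil => intro s; rfl
  | cons c t ih =>
      intro s
      simp only [List.foldl_cons, ih, stepA_snd]

-- closed string body: A's in-string fold lands back in the not-in-string state on the rest
theorem foldl_gA_string_closed : ∀ (l r : List Char) (cl : List Char),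
    scanString l = some r →
    l.foldl gA (cl, true, false) = r.foldl gA (cl, false, false) := by
  intro l
  induction l using scanString.induct with
  | case1 => intro r cl h; simp [scanString] at h
  | case2 => intro r cl h; simp [scanString] at h
  | case3 head rs ih =>
      intro r cl h
      rw [scanString] at h
      simp at h
      simp only [List.foldl_cons]
      rw [gA_str_bs, gA_esc, ih r cl h]
  | case4 rs h0 =>
      intro r cl h
      simp [scanString.eq_def] at h
      subst h
      simp only [List.foldl_cons]
      rw [gA_str_quote]
  | case5 head rs hbs hq ih =>
      intro r cl h
      rw [scanString.eq_def] at h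
      simp [hbs, hq] at h
      simp only [List.foldl_cons]
      rw [gA_str_other cl head hbs hq, ih r cl h]

-- unterminated string body: closers untouched, in_string stays true
theorem foldl_gA_string_open : ∀ (l : List Char) (cl : List Char),
    scanString l = none →
    (l.foldl gA (cl, true, false)).1 = cl ∧ (l.foldl gA (cl, true, false)).2.1 = true := by
  intro l
  induction l using scanString.induct with
  | case1 => intro cl _; simp
  | case2 =>
      intro cl h
      simp only [List.foldl_cons]
      rw [gA_str_bs]
      simp
  | case3 head rs ih =>
      intro cl h
      rw [scanString] at h
      simp at h
      simp only [List.foldl_cons]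
      rw [gA_str_bs, gA_esc]
      exact ih cl h
  | case4 rs h0 =>
      intro cl h
      simp [scanString.eq_def] at h
  | case5 head rs hbs hq ih =>
      intro cl h
      rw [scanString.eq_def] at h
      simp [hbs, hq] at h
      simp only [List.foldl_cons]
      rw [gA_str_other cl head hbs hq]
      exact ih cl h

-- main correspondence between A's flat fold and B's nested recursion
theorem foldl_gA_closeB : ∀ (l : List Char) (cl : List Char),
    (l.foldl gA (cl, false, false)).1 = (closeB l cl).1 ∧
    (l.foldl gA (cl, false, false)).2.1 = (closeB l cl).2 := by
  intro l cl
  induction l, cl using closeB.induct with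
  | case1 stack => simp [closeB]
  | case2 rest stack ih =>
      simp only [List.foldl_cons]
      rw [gA_brace]
      simpa [closeB] using ih
  | case3 rest stack h1 ih =>
      simp only [List.foldl_cons]
      rw [gA_brack]
      simpa [closeB] using ih
  | case4 c rest stack h1 h2 hclose hp ih =>
      simp only [List.foldl_cons]
      rw [gA_pop stack c hclose hp]
      have hB : closeB (c :: rest) stack = closeB rest stack.tail := by
        rw [closeB.eq_def]
        simp only [if_neg h1, if_neg h2, if_pos hclose, if_pos hp]
      rw [hB]
      exact ih
  | case5 c rest stack h1 h2 hclose hp ih =>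
      simp only [List.foldl_cons]
      rw [gA_nopop stack c hclose hp]
      have hB : closeB (c :: rest) stack = closeB rest stack := by
        rw [closeB.eq_def]
        simp only [if_neg h1, if_neg h2, if_pos hclose, if_neg hp]
      rw [hB]
      exact ih
  | case6 rest stack rest' hscan h1 h2 h3 ih =>
      simp only [List.foldl_cons]
      rw [gA_quote, foldl_gA_string_closed rest rest' stack hscan]
      have hB : closeB ('"' :: rest) stack = closeB rest' stack := by
        rw [closeB.eq_def]
        simp only [Char.reduceEq, or_self, if_false, if_true]
        split
        · next r' hr => rw [hr] at hscan; injection hscan with e; rw [e]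
        · next hr => rw [hr] at hscan; cases hscan
      rw [hB]
      exact ih
  | case7 rest stack hscan h1 h2 h3 =>
      simp only [List.foldl_cons]
      rw [gA_quote]
      have hB : closeB ('"' :: rest) stack = (stack, true) := by
        rw [closeB.eq_def]
        simp only [Char.reduceEq, or_self, if_false, if_true]
        split
        · next r' hr => rw [hr] at hscan; cases hscan
        · rfl
      rw [hB]
      exact foldl_gA_string_open rest stack hscan
  | case8 c rest stack h1 h2 h3 hq ih =>
      simp only [List.foldl_cons]
      rw [gA_plain stack c h1 h2 h3 hq]
      have hB : closeB (c :: rest) stack = closeB rest stack := by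
        rw [closeB.eq_def]
        simp only [if_neg h1, if_neg h2, if_neg h3, if_neg hq]
      rw [hB]
      exact ih

-- ===== VERDICT (by name: the statement is the Claim_ definition above) =====
theorem close_partial_json_spec : Claim_equal_close_partial_json := by
  intro raw _
  unfold Spec_close_partial_json close_partial_json close_partial_json_alt
  have hfst := foldl_stepA_fst raw.toList ([], [], false, false)
  have hsnd := foldl_stepA_snd raw.toList ([], [], false, false)
  have hmain := foldl_gA_closeB raw.toList []
  rw [← hsnd] at hmain
  obtain ⟨h1, h2⟩ := hmain
  simp only [List.nil_append] at hfst
  dsimp only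
  rw [hfst, h1, h2]
  cases hb : (closeB raw.toList []).2 <;> simp
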